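-- pv_equiv track=rewrite | github.com/mmarcos05/Guia3conMartu | Luli/estoyharta.py | ap_antes_corte
-- ===== SOURCE A (Python) =====
-- def ap_antes_corte(c: chr, s: str) -> int:
--     contador: int = 0
--     saldo: int = 0
--
--     for char in s:
--         if char == 'r':
--             saldo += 350
--         if char == 'v':
--             saldo -= 56
--         if char == 'x':
--             return contador
--
--         if char == c:
--             if saldo >= 0:
--                 contador += 1
--
--     return contador
-- ===== SOURCE B (Python) =====
-- def ap_antes_corte(c: chr, s: str) -> int:
--     # Precomputed-table approach: truncate at the first 'x', build the
--     # running-balance table, then count matches in a second pass.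
--     prefix = s.split('x', 1)[0]
--     deltas = [350 if ch == 'r' else -56 if ch == 'v' else 0 for ch in prefix]
--     balances = []
--     total = 0
--     for d in deltas:
--         total += d
--         balances.append(total)
--     return sum(1 for ch, b in zip(prefix, balances) if ch == c and b >= 0)
-- ===== Notes on version B (the rewrite author's own statement) =====
-- stated objective: alternative
-- what changed: Replaced the single stateful loop with early return by a three-stage pipeline: truncate at the first 'x' up front, precompute the running-balance table from per-char deltas, then count matching positions with non-negative balance in a separate pass.
import Mathlib
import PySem

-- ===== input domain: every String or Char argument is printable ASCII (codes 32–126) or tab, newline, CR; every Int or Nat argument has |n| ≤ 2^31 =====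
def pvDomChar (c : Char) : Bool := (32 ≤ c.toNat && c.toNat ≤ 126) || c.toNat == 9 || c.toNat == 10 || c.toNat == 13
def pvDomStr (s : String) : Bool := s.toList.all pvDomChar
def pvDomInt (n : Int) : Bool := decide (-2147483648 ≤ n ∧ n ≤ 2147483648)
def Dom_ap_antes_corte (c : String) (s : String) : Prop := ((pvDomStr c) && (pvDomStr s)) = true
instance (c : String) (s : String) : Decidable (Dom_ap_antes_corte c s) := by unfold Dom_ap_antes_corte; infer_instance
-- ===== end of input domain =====

-- B restructures A's single stateful loop into truncate-at-'x' + precomputed running-balance table + a separate counting pass (objective: alternative).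

-- ===== PORT A =====
-- the loop with early return at 'x', carried state (contador, saldo)
def apLoopA (c : String) : List Char → Int → Int → Int
  | [], contador, _ => contador
  | ch :: rest, contador, saldo =>
    let saldo := if ch = 'r' then saldo + 350 else saldo
    let saldo := if ch = 'v' then saldo - 56 else saldo
    if ch = 'x' then contador
    else
      let contador := if String.mk [ch] = c then (if saldo ≥ 0 then contador + 1 else contador) else contador
      apLoopA c rest contador saldo

def ap_antes_corte (c : String) (s : String) : Int :=
  apLoopA c s.toList 0 0

-- ===== PORT B =====
-- running-balance table: the `balances.append(total)` loop from Source B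
def apBalLoop (acc : List Int) (total : Int) : List Int → List Int
  | [] => acc
  | d :: ds => apBalLoop (acc ++ [total + d]) (total + d) ds

def ap_antes_corte_alt (c : String) (s : String) : Int :=
  -- s.split('x', 1)[0] = the prefix of s before the first 'x'
  let pre := s.toList.takeWhile (fun ch => ch != 'x')
  let deltas := pre.map (fun ch => if ch = 'r' then (350 : Int) else if ch = 'v' then -56 else 0)
  let balances := apBalLoop [] 0 deltas
  ((pre.zip balances).filter (fun p => String.mk [p.1] = c ∧ p.2 ≥ 0)).length

-- ===== PRECONDITION & SPEC =====
def Spec_ap_antes_corte (c : String) (s : String) (out : Int) : Prop := out = ap_antes_corte_alt c s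
instance (c : String) (s : String) (out : Int) : Decidable (Spec_ap_antes_corte c s out) := by unfold Spec_ap_antes_corte; infer_instance

-- ===== CLAIM (what is proved, stated in full; the proofs are below) =====
def Claim_equal_ap_antes_corte : Prop := ∀ (c : String) (s : String), Dom_ap_antes_corte c s → Spec_ap_antes_corte c s (ap_antes_corte c s)

-- ===== LEMMAS AND PROOFS =====
-- per-char delta (proof helper)
def pvDelta (ch : Char) : Int := if ch = 'r' then 350 else if ch = 'v' then -56 else 0

theorem apBalLoop_acc (ds : List Int) : ∀ (acc : List Int) (t : Int),
    apBalLoop acc t ds = acc ++ apBalLoop [] t ds := by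
  induction ds with
  | nil => intro acc t; simp [apBalLoop]
  | cons d ds ih =>
    intro acc t
    show apBalLoop (acc ++ [t + d]) (t + d) ds = acc ++ apBalLoop ([] ++ [t + d]) (t + d) ds
    rw [ih (acc ++ [t + d]), ih ([] ++ [t + d])]
    simp

theorem apBalLoop_cons (t d : Int) (ds : List Int) :
    apBalLoop [] t (d :: ds) = (t + d) :: apBalLoop [] (t + d) ds := by
  show apBalLoop ([] ++ [t + d]) (t + d) ds = _
  rw [apBalLoop_acc]
  simp

-- the count over the x-free prefix, with balance offset t
theorem key (c : String) (l : List Char) (hx : ∀ ch ∈ l, ch ≠ 'x') :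
    ∀ (t contador : Int),
    apLoopA c l contador t = contador +
      ((l.zip (apBalLoop [] t (l.map pvDelta))).filter (fun p => String.mk [p.1] = c ∧ p.2 ≥ 0)).length := by
  induction l with
  | nil => intro t contador; simp [apLoopA, apBalLoop]
  | cons ch rest ih =>
    intro t contador
    have hch : ch ≠ 'x' := hx ch (List.mem_cons_self ..)
    have hrest : ∀ a ∈ rest, a ≠ 'x' := fun a ha => hx a (List.mem_cons_of_mem _ ha)
    have hsaldo : (if ch = 'v' then (if ch = 'r' then t + 350 else t) - 56
                   else (if ch = 'r' then t + 350 else t)) = t + pvDelta ch := by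
      unfold pvDelta; split_ifs <;> simp_all <;> omega
    simp only [apLoopA, if_neg hch, List.map_cons, apBalLoop_cons, List.zip_cons_cons,
      List.filter_cons, hsaldo]
    by_cases hc : String.mk [ch] = c ∧ t + pvDelta ch ≥ 0
    · have hd : decide (String.mk [ch] = c ∧ t + pvDelta ch ≥ 0) = true := by
        simp only [decide_eq_true_eq]; exact hc
      rw [if_pos hc.1, if_pos hc.2, if_pos hd, ih hrest (t + pvDelta ch)]
      rw [List.length_cons]; push_cast; ring
    · have hd : ¬ decide (String.mk [ch] = c ∧ t + pvDelta ch ≥ 0) = true := by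
        simp only [decide_eq_true_eq]; exact hc
      rcases Classical.em (String.mk [ch] = c) with h1 | h1
      · have h2 : ¬ t + pvDelta ch ≥ 0 := fun h => hc ⟨h1, h⟩
        rw [if_pos h1, if_neg h2, if_neg hd]
        exact ih hrest (t + pvDelta ch) contador
      · rw [if_neg h1, if_neg hd]
        exact ih hrest (t + pvDelta ch) contador

-- A's x-stopping loop equals the loop over the x-free prefix
theorem apLoopA_takeWhile (c : String) (l : List Char) :
    ∀ (t contador : Int),
    apLoopA c l contador t = apLoopA c (l.takeWhile (fun ch => ch != 'x')) contador t := by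
  induction l with
  | nil => intro t contador; rfl
  | cons ch rest ih =>
    intro t contador
    by_cases hch : ch = 'x'
    · subst hch
      simp [apLoopA]
    · have hb : (ch != 'x') = true := by simp [hch]
      rw [List.takeWhile_cons, if_pos hb]
      simp only [apLoopA, if_neg hch]
      split_ifs <;> exact ih _ _

theorem mem_takeWhile_ne_x (s : List Char) (ch : Char)
    (h : ch ∈ s.takeWhile (fun ch => ch != 'x')) : ch ≠ 'x' := by
  simpa using List.mem_takeWhile_imp h

-- ===== VERDICT (by name: the statement is the Claim_ definition above) =====
theorem ap_antes_corte_spec : Claim_equal_ap_antes_corte := by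
  intro c s _
  show ap_antes_corte c s = ap_antes_corte_alt c s
  unfold ap_antes_corte ap_antes_corte_alt
  rw [apLoopA_takeWhile, key c _ (mem_takeWhile_ne_x s.toList) 0 0, zero_add]
  rfl
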